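-- pv_equiv track=rewrite | github.com/Carreau/difflib2.py | difflib2/difflib2.py | match_itergroup
-- ===== SOURCE A (Python) =====
-- def match_itergroup(seqtuple):
--     seq = iter(seqtuple)
--     start = next(seq)
--     prev = start
--     for elem in seq:
--         if tuple(map(lambda x:x+1 if x is not None else x,prev)) != elem:
--             yield tuple(zip(start,prev))
--             start = elem
--         prev = elem
--     yield tuple(zip(start,prev))
-- ===== SOURCE B (Python) =====
-- def match_itergroup(seqtuple):
--     # backward pass: build (start, end) pairs scanning from the right,
--     # merging an element into the group that follows it when it increments into it
--     def shifted(p):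
--         return tuple(c + 1 if c is not None else None for c in p)
--     groups = []  # latest appended group is the earliest in the sequence
--     for elem in reversed(seqtuple):
--         if groups and shifted(elem) == groups[-1][0]:
--             groups[-1] = (elem, groups[-1][1])
--         else:
--             groups.append((elem, elem))
--     for a, b in reversed(groups):
--         yield tuple(zip(a, b))
-- ===== Notes on version B (the rewrite author's own statement) =====
-- stated objective: alternative
-- what changed: A streams forward keeping (start, prev) state and emitting a group at each break; B scans the list backward once, merging each element into the following group's (start, end) pair, then emits all groups.
import Mathlib
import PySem

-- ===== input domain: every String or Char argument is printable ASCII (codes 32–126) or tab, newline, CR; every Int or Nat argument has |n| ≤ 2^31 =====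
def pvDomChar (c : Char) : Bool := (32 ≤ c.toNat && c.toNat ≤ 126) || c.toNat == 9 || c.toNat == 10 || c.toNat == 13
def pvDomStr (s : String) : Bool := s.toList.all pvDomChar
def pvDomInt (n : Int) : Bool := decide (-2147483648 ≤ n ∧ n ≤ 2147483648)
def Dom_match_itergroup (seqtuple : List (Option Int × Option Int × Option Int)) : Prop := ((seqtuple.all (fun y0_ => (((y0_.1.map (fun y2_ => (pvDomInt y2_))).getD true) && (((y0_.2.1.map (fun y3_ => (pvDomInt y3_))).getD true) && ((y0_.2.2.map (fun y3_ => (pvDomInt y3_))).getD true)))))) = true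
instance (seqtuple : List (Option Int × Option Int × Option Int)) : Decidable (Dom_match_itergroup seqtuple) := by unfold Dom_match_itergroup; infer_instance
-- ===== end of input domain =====

-- B replaces A's forward streaming (start, prev) scan with a single backward pass that
-- merges each element into the group after it (alternative decomposition, same cost);
-- on the empty input (excluded by Pre_) A raises RuntimeError while B yields nothing.


-- tuple(map(lambda x: x+1 if x is not None else x, p)) : elementwise successor keeping None
def pvShift (p : Option Int × Option Int × Option Int) : Option Int × Option Int × Option Int :=
  (p.1.map (· + 1), p.2.1.map (· + 1), p.2.2.map (· + 1))

-- tuple(zip(a, b)) for 3-tuples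
def pvZip3 (a b : Option Int × Option Int × Option Int) :
    (Option Int × Option Int) × (Option Int × Option Int) × (Option Int × Option Int) :=
  ((a.1, b.1), (a.2.1, b.2.1), (a.2.2, b.2.2))

-- ===== PORT A =====
-- A's loop body: state = (emitted list, start, prev); branch order as in the Python
def pvStepA (st : List ((Option Int × Option Int) × (Option Int × Option Int) × (Option Int × Option Int)) × (Option Int × Option Int × Option Int) × (Option Int × Option Int × Option Int))
    (elem : Option Int × Option Int × Option Int) :
    List ((Option Int × Option Int) × (Option Int × Option Int) × (Option Int × Option Int)) × (Option Int × Option Int × Option Int) × (Option Int × Option Int × Option Int) :=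
  if pvShift st.2.2 ≠ elem then (st.1 ++ [pvZip3 st.2.1 st.2.2], elem, elem)
  else (st.1, st.2.1, elem)

def match_itergroup (seqtuple : List (Option Int × Option Int × Option Int)) : List ((Option Int × Option Int) × (Option Int × Option Int) × (Option Int × Option Int)) :=
  match seqtuple with
  | [] => []   -- unreachable under Pre_: Python raises RuntimeError here
  | start :: rest =>
    let st := rest.foldl pvStepA ([], start, start)
    st.1 ++ [pvZip3 st.2.1 st.2.2]

-- ===== PORT B =====
-- Source B's backward pass; `groups` is kept head-first here (head = Python's groups[-1],
-- the group earliest in the sequence so far), so Python's final reversed(groups) is just gs.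
def pvStepB (elem : Option Int × Option Int × Option Int)
    (gs : List ((Option Int × Option Int × Option Int) × (Option Int × Option Int × Option Int))) :
    List ((Option Int × Option Int × Option Int) × (Option Int × Option Int × Option Int)) :=
  match gs with
  | (a, b) :: rest => if pvShift elem = a then (elem, b) :: rest else (elem, elem) :: (a, b) :: rest
  | [] => [(elem, elem)]

def match_itergroup_alt (seqtuple : List (Option Int × Option Int × Option Int)) : List ((Option Int × Option Int) × (Option Int × Option Int) × (Option Int × Option Int)) :=
  (seqtuple.foldr pvStepB []).map (fun g => pvZip3 g.1 g.2)

-- ===== PRECONDITION & SPEC =====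
-- On the empty input A's generator raises RuntimeError (next() on an exhausted iterator).
def Pre_match_itergroup (seqtuple : List (Option Int × Option Int × Option Int)) : Prop := seqtuple ≠ []
instance (seqtuple : List (Option Int × Option Int × Option Int)) : Decidable (Pre_match_itergroup seqtuple) := by unfold Pre_match_itergroup; infer_instance
def pvWitness_match_itergroup : (List (Option Int × Option Int × Option Int)) := [(some 0, some 1, none)]

def Spec_match_itergroup (seqtuple : List (Option Int × Option Int × Option Int)) (out : List ((Option Int × Option Int) × (Option Int × Option Int) × (Option Int × Option Int))) : Prop := out = match_itergroup_alt seqtuple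
instance (seqtuple : List (Option Int × Option Int × Option Int)) (out : List ((Option Int × Option Int) × (Option Int × Option Int) × (Option Int × Option Int))) : Decidable (Spec_match_itergroup seqtuple out) := by unfold Spec_match_itergroup; infer_instance

-- ===== CLAIM (what is proved, stated in full; the proofs are below) =====
def Claim_equal_match_itergroup : Prop := ∀ (seqtuple : List (Option Int × Option Int × Option Int)), Dom_match_itergroup seqtuple → Pre_match_itergroup seqtuple → Spec_match_itergroup seqtuple (match_itergroup seqtuple)

-- ===== LEMMAS AND PROOFS =====

-- the recursive form of A's loop (groups emitted in order)
def pvF (start prev : Option Int × Option Int × Option Int)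
    (rest : List (Option Int × Option Int × Option Int)) :
    List ((Option Int × Option Int) × (Option Int × Option Int) × (Option Int × Option Int)) :=
  match rest with
  | [] => [pvZip3 start prev]
  | e :: rs => if pvShift prev ≠ e then pvZip3 start prev :: pvF e e rs else pvF start e rs

-- end of the first group, and the remaining groups, of pvF (independent of start)
def pvFe (prev : Option Int × Option Int × Option Int)
    (rest : List (Option Int × Option Int × Option Int)) : Option Int × Option Int × Option Int :=
  match rest with
  | [] => prev
  | e :: rs => if pvShift prev ≠ e then prev else pvFe e rs

def pvFt (prev : Option Int × Option Int × Option Int)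
    (rest : List (Option Int × Option Int × Option Int)) :
    List ((Option Int × Option Int) × (Option Int × Option Int) × (Option Int × Option Int)) :=
  match rest with
  | [] => []
  | e :: rs => if pvShift prev ≠ e then pvF e e rs else pvFt e rs

theorem pvF_split (rest : List (Option Int × Option Int × Option Int)) :
    ∀ start prev, pvF start prev rest = pvZip3 start (pvFe prev rest) :: pvFt prev rest := by
  induction rest with
  | nil => intro start prev; simp [pvF, pvFe, pvFt]
  | cons e rs ih =>
    intro start prev
    simp only [pvF, pvFe, pvFt]
    split_ifs <;> simp [ih]

theorem pvA_loop (rest : List (Option Int × Option Int × Option Int)) :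
    ∀ acc start prev,
      (rest.foldl pvStepA (acc, start, prev)).1
        ++ [pvZip3 (rest.foldl pvStepA (acc, start, prev)).2.1
                   (rest.foldl pvStepA (acc, start, prev)).2.2]
      = acc ++ pvF start prev rest := by
  induction rest with
  | nil => intro acc start prev; simp [pvF]
  | cons e rs ih =>
    intro acc start prev
    simp only [List.foldl_cons, pvF, pvStepA]
    split_ifs with h
    · rw [ih]; simp
    · rw [ih]

-- pvStepB always produces a head whose start is the new element
theorem pvStepB_head (elem : Option Int × Option Int × Option Int)
    (gs : List ((Option Int × Option Int × Option Int) × (Option Int × Option Int × Option Int))) :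
    ∃ b rest, pvStepB elem gs = (elem, b) :: rest := by
  cases gs with
  | nil => exact ⟨elem, [], rfl⟩
  | cons g rs =>
    obtain ⟨a, b⟩ := g
    simp only [pvStepB]
    split_ifs <;> exact ⟨_, _, rfl⟩

theorem pvB_eq_F (xs : List (Option Int × Option Int × Option Int)) :
    ∀ x, ((x :: xs).foldr pvStepB []).map (fun g => pvZip3 g.1 g.2) = pvF x x xs := by
  induction xs with
  | nil => intro x; simp [pvStepB, pvF]
  | cons y ys ih =>
    intro x
    obtain ⟨b, rest, hb⟩ := pvStepB_head y (ys.foldr pvStepB [])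
    have hIH := ih y
    simp only [List.foldr_cons] at hIH ⊢
    rw [hb] at hIH ⊢
    rw [pvF_split ys y (start := y)] at hIH
    simp only [List.map_cons] at hIH
    have hb2 : b = pvFe y ys := by
      have h1 : pvZip3 y b = pvZip3 y (pvFe y ys) := by
        simpa using congrArg List.head? hIH
      simp only [pvZip3, Prod.mk.injEq] at h1
      rw [Prod.ext_iff, Prod.ext_iff]
      exact ⟨h1.1.2, h1.2.1.2, h1.2.2.2⟩
    have hrest : rest.map (fun g => pvZip3 g.1 g.2) = pvFt y ys :=
      (List.cons.injEq _ _ _ _ ▸ hIH).2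
    simp only [pvStepB, pvF, hb2]
    by_cases h : pvShift x = y
    · rw [if_pos h, if_neg (by simp [h] : ¬ pvShift x ≠ y)]
      rw [pvF_split]
      simp [hrest]
    · rw [if_neg h, if_pos h]
      rw [pvF_split ys y (start := y)]
      simp [hrest]

-- ===== VERDICT (by name: the statement is the Claim_ definition above) =====
theorem match_itergroup_spec : Claim_equal_match_itergroup := by
  intro seqtuple _ hpre
  unfold Spec_match_itergroup match_itergroup match_itergroup_alt
  cases seqtuple with
  | nil => exact absurd rfl hpre
  | cons x xs =>
    simp only
    rw [pvB_eq_F]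
    exact pvA_loop xs [] x x
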